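-- pv_equiv track=rewrite | github.com/PraagyaAgrawal/Monte-Carlo | ising_model.py | E_ij_vertical
-- ===== SOURCE A (Python) =====
-- size = 4
--
-- def E_ij_vertical(E, arr):
-- 	sum3 = 0
-- 	for i in range(size-1):
-- 		for j in range(size):
-- 			sum3 += E*arr[i][j]*arr[i+1][j]
-- 	for k in range(size):
-- 		sum3 += E*arr[0][k]*arr[-1][k]
-- 	return sum3
-- ===== SOURCE B (Python) =====
-- size = 4
--
-- def E_ij_vertical(E, arr):
-- 	def dot(u, v, j):
-- 		if j == size:
-- 			return 0
-- 		return u[j] * v[j] + dot(u, v, j + 1)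
--
-- 	def chain(i):
-- 		if i == size - 1:
-- 			return dot(arr[0], arr[-1], 0)
-- 		return dot(arr[i], arr[i + 1], 0) + chain(i + 1)
--
-- 	return E * chain(0)
-- ===== Notes on version B (the rewrite author's own statement) =====
-- stated objective: alternative
-- what changed: B is fully recursive and vector-level: a recursive dot product of two rows and a recursive chain that adds dot(arr[i], arr[i+1]) and closes the cycle with dot(arr[0], arr[-1]) at its base case, replacing A's two iterative index loops (bulk pass plus separate boundary pass) and its per-scalar accumulation.
import Mathlib
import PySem

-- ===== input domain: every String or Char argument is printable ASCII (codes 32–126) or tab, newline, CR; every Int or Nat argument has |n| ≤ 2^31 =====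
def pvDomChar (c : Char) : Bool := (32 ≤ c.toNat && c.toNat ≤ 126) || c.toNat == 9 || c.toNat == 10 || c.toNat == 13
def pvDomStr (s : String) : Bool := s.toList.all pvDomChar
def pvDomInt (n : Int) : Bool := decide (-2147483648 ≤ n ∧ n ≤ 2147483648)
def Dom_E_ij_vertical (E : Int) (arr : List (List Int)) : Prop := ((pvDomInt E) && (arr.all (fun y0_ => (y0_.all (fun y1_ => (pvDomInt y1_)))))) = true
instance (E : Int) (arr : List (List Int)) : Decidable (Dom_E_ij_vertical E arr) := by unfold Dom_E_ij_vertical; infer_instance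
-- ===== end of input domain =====

-- B replaces A's two iterative scalar loops by a recursive chain of recursive row dot products,
-- closing the cycle with dot(arr[0], arr[-1]) at the base case; return values agree on Pre_.

-- ===== PORT A =====
-- arr[i] / row[j]; inside Pre_ every access is in range, so the .getD defaults are never used
def pvRow (arr : List (List Int)) (i : Int) : List Int := (PySem.List.pyGet? arr i).getD []
def pvAt (r : List Int) (j : Int) : Int := (PySem.List.pyGet? r j).getD 0

def E_ij_vertical (E : Int) (arr : List (List Int)) : Int :=
  let sum3 : Int := 0
  let sum3 := (PySem.List.pyRange 0 (4 - 1) 1).foldl (fun s i =>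
      (PySem.List.pyRange 0 4 1).foldl (fun s j =>
        s + E * pvAt (pvRow arr i) j * pvAt (pvRow arr (i + 1)) j) s) sum3
  let sum3 := (PySem.List.pyRange 0 4 1).foldl (fun s k =>
      s + E * pvAt (pvRow arr 0) k * pvAt (pvRow arr (-1)) k) sum3
  sum3

-- ===== PORT B =====
-- dot(u, v, j): if j == size: 0 else u[j]*v[j] + dot(u, v, j+1); j : Nat counts up from 0,
-- so the termination guard '4 <= j' coincides with Python's 'j == 4' on every reachable call
def pvDot (u v : List Int) (j : Nat) : Int :=
  if 4 ≤ j then 0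
  else pvAt u j * pvAt v j + pvDot u v (j + 1)
termination_by 4 - j

-- chain(i): if i == size-1: dot(arr[0], arr[-1], 0) else dot(arr[i], arr[i+1], 0) + chain(i+1);
-- same reachable-call remark for the guard '3 <= i'
def pvChain (arr : List (List Int)) (i : Nat) : Int :=
  if 3 ≤ i then pvDot (pvRow arr 0) (pvRow arr (-1)) 0
  else pvDot (pvRow arr i) (pvRow arr (i + 1)) 0 + pvChain arr (i + 1)
termination_by 3 - i

def E_ij_vertical_alt (E : Int) (arr : List (List Int)) : Int :=
  E * pvChain arr 0

-- ===== PRECONDITION & SPEC =====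
-- Pre_ excludes exactly the inputs on which A raises IndexError: fewer than 4 rows, or a row
-- among the first four (or the last row) shorter than 4.
def Pre_E_ij_vertical (E : Int) (arr : List (List Int)) : Prop :=
  4 ≤ arr.length ∧ (∀ r ∈ arr.take 4, 4 ≤ r.length) ∧ 4 ≤ (arr.getLast?.getD []).length
instance (E : Int) (arr : List (List Int)) : Decidable (Pre_E_ij_vertical E arr) := by
  unfold Pre_E_ij_vertical; infer_instance

def pvWitness_E_ij_vertical : Int × List (List Int) :=
  (1, [[1,1,1,1],[1,-1,1,-1],[1,1,-1,-1],[-1,1,1,1]])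

def Spec_E_ij_vertical (E : Int) (arr : List (List Int)) (out : Int) : Prop := out = E_ij_vertical_alt E arr
instance (E : Int) (arr : List (List Int)) (out : Int) : Decidable (Spec_E_ij_vertical E arr out) := by unfold Spec_E_ij_vertical; infer_instance

-- ===== CLAIM (what is proved, stated in full; the proofs are below) =====
def Claim_equal_E_ij_vertical : Prop := ∀ (E : Int) (arr : List (List Int)), Dom_E_ij_vertical E arr → Pre_E_ij_vertical E arr → Spec_E_ij_vertical E arr (E_ij_vertical E arr)

-- ===== LEMMAS AND PROOFS =====

theorem four_le_destruct {α : Type} (l : List α) (h : 4 ≤ l.length) :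
    ∃ a b c d r, l = a :: b :: c :: d :: r := by
  match l with
  | a :: b :: c :: d :: r => exact ⟨a, b, c, d, r, rfl⟩

theorem pvRange34 : PySem.List.pyRange 0 3 1 = [0, 1, 2] := by decide
theorem pvRange44 : PySem.List.pyRange 0 4 1 = [0, 1, 2, 3] := by decide

theorem pvGetLit1 {α : Type} (x0 x1 x2 x3 : α) (xs : List α) :
    PySem.List.pyGet? (x0 :: x1 :: x2 :: x3 :: xs) 1 = some x1 := by
  rw [show (1 : Int) = ((1 : Nat) : Int) by norm_num, PySem.List.pyGet?_natCast]; simp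
theorem pvGetLit2 {α : Type} (x0 x1 x2 x3 : α) (xs : List α) :
    PySem.List.pyGet? (x0 :: x1 :: x2 :: x3 :: xs) 2 = some x2 := by
  rw [show (2 : Int) = ((2 : Nat) : Int) by norm_num, PySem.List.pyGet?_natCast]; simp
theorem pvGetLit3 {α : Type} (x0 x1 x2 x3 : α) (xs : List α) :
    PySem.List.pyGet? (x0 :: x1 :: x2 :: x3 :: xs) 3 = some x3 := by
  rw [show (3 : Int) = ((3 : Nat) : Int) by norm_num, PySem.List.pyGet?_natCast]; simp

-- ===== VERDICT (by name: the statement is the Claim_ definition above) =====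
theorem E_ij_vertical_spec : Claim_equal_E_ij_vertical := by
  intro E arr _ hpre
  obtain ⟨hlen, hrows, hlast⟩ := hpre
  obtain ⟨a, b, c, d, rest, rfl⟩ := four_le_destruct arr hlen
  obtain ⟨a0, a1, a2, a3, ar, rfl⟩ := four_le_destruct a (hrows a (by simp))
  obtain ⟨b0, b1, b2, b3, br, rfl⟩ := four_le_destruct b (hrows b (by simp))
  obtain ⟨c0, c1, c2, c3, cr, rfl⟩ := four_le_destruct c (hrows c (by simp))
  obtain ⟨d0, d1, d2, d3, dr, rfl⟩ := four_le_destruct d (hrows d (by simp))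
  obtain ⟨L, hLs⟩ : ∃ L, ((a0::a1::a2::a3::ar) :: (b0::b1::b2::b3::br) :: (c0::c1::c2::c3::cr) ::
      (d0::d1::d2::d3::dr) :: rest).getLast? = some L := by
    cases h : ((a0::a1::a2::a3::ar) :: (b0::b1::b2::b3::br) :: (c0::c1::c2::c3::cr) ::
        (d0::d1::d2::d3::dr) :: rest).getLast? with
    | none => simp at h
    | some L => exact ⟨L, rfl⟩
  have hLlen : 4 ≤ L.length := by rw [hLs] at hlast; simpa using hlast
  obtain ⟨l0, l1, l2, l3, lr, rfl⟩ := four_le_destruct L hLlen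
  have hgl : PySem.List.pyGet? ((a0::a1::a2::a3::ar) :: (b0::b1::b2::b3::br) ::
      (c0::c1::c2::c3::cr) :: (d0::d1::d2::d3::dr) :: rest) (-1) = some (l0::l1::l2::l3::lr) := by
    rw [PySem.List.pyGet?_neg_one, hLs]
  unfold Spec_E_ij_vertical
  simp only [E_ij_vertical, E_ij_vertical_alt, pvRange44, List.foldl]
  simp [pvRange34, pvChain, pvDot, pvRow, pvAt, hgl, pvGetLit1, pvGetLit2, pvGetLit3,
        PySem.List.pyGet?]
  ring
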